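-- pv_equiv track=rewrite | github.com/yejiwon/algorithm | jiwon/Implementation/괄호변환.py | isBalancedString
-- ===== SOURCE A (Python) =====
-- LEFT_PARENTHESIS = "("
--
-- def isBalancedString(string):
--     leftCount = 0
--     rightCount = 0
--
--     for s in string:
--         if s == LEFT_PARENTHESIS:
--             leftCount += 1
--         else:
--             rightCount += 1
--         if leftCount == rightCount:
--             return leftCount + rightCount
-- ===== SOURCE B (Python) =====
-- def isBalancedString(string):
--     # prefix-balance table: running sum of +1 for '(' and -1 otherwise,
--     # then find the first position where the balance is 0
--     sums = []
--     s = 0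
--     for c in string:
--         s += 1 if c == "(" else -1
--         sums.append(s)
--     if 0 in sums:
--         return sums.index(0) + 1
--     return None
-- ===== Notes on version B (the rewrite author's own statement) =====
-- stated objective: alternative
-- what changed: Replaces the two-counter early-return scan with a prefix-balance table (+1/-1 running sums) searched for the first zero, returning its index+1 or None.
import Mathlib
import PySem

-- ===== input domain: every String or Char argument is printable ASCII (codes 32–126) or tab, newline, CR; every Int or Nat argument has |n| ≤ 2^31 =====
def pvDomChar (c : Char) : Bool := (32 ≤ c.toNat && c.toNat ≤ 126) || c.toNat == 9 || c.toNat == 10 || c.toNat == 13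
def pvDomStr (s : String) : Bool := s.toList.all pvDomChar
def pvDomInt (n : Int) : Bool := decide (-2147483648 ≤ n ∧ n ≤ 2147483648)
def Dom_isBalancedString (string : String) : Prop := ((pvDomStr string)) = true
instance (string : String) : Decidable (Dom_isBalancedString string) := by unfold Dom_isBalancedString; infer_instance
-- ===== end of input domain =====

-- B replaces A's two-counter early-return scan with a prefix-balance table searched for its first zero (alternative decomposition, same cost).


-- ===== PORT A =====
-- loop over the characters keeping leftCount/rightCount, returning at the first equality
def isBalancedGoA : List Char → Int → Int → Option Int
  | [], _, _ => none
  | c :: cs, leftCount, rightCount =>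
    let l := if c = '(' then leftCount + 1 else leftCount
    let r := if c = '(' then rightCount else rightCount + 1
    if l = r then some (l + r) else isBalancedGoA cs l r

def isBalancedString (string : String) : Option Int :=
  isBalancedGoA string.toList 0 0

-- ===== PORT B =====
-- running cumulative sums of +1 for '(' and -1 otherwise (B's `sums` list)
def isBalancedSums : List Char → Int → List Int
  | [], _ => []
  | c :: cs, s =>
    let s' := s + (if c = '(' then 1 else -1)
    s' :: isBalancedSums cs s'

def isBalancedString_alt (string : String) : Option Int :=
  let sums := isBalancedSums string.toList 0
  match PySem.List.index? sums 0 with   -- `0 in sums` / `sums.index(0)` of Source B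
  | some i => some ((i : Int) + 1)
  | none => none

-- ===== PRECONDITION & SPEC =====
def Spec_isBalancedString (string : String) (out : Option Int) : Prop := out = isBalancedString_alt string
instance (string : String) (out : Option Int) : Decidable (Spec_isBalancedString string out) := by unfold Spec_isBalancedString; infer_instance

-- ===== CLAIM (what is proved, stated in full; the proofs are below) =====
def Claim_equal_isBalancedString : Prop := ∀ (string : String), Dom_isBalancedString string → Spec_isBalancedString string (isBalancedString string)

-- ===== LEMMAS AND PROOFS =====
theorem isBalancedGoA_eq (cs : List Char) : ∀ (l r : Int),
    isBalancedGoA cs l r =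
      match PySem.List.index? (isBalancedSums cs (l - r)) 0 with
      | some i => some (l + r + ((i : Int) + 1))
      | none => none := by
  induction cs with
  | nil => intro l r; simp [isBalancedGoA, isBalancedSums, PySem.List.index?]
  | cons c cs ih =>
    intro l r
    by_cases hc : c = '('
    · have hsums : isBalancedSums (c :: cs) (l - r)
          = (l - r + 1) :: isBalancedSums cs (l - r + 1) := by
        simp [isBalancedSums, hc]
      rw [hsums]
      by_cases hz : l - r + 1 = 0
      · have hlr : l + 1 = r := by omega
        rw [hz, PySem.List.index?_cons_self]
        simp [isBalancedGoA, hc, hlr]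
        omega
      · have hlr : ¬ (l + 1 = r) := by omega
        rw [show isBalancedGoA (c :: cs) l r = isBalancedGoA cs (l + 1) r by
          simp [isBalancedGoA, hc, hlr]]
        rw [ih (l + 1) r, show (l + 1 - r : Int) = l - r + 1 by ring,
          PySem.List.index?_cons_of_ne _ hz]
        cases PySem.List.index? (isBalancedSums cs (l - r + 1)) 0 with
        | none => simp
        | some i => simp; ring
    · have hsums : isBalancedSums (c :: cs) (l - r)
          = (l - r + -1) :: isBalancedSums cs (l - r + -1) := by
        simp [isBalancedSums, hc]
      rw [hsums]
      by_cases hz : l - r + -1 = 0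
      · have hlr : l = r + 1 := by omega
        rw [hz, PySem.List.index?_cons_self]
        simp [isBalancedGoA, hc, hlr]
        omega
      · have hlr : ¬ (l = r + 1) := by omega
        rw [show isBalancedGoA (c :: cs) l r = isBalancedGoA cs l (r + 1) by
          simp [isBalancedGoA, hc, hlr]]
        rw [ih l (r + 1), show (l - (r + 1) : Int) = l - r + -1 by ring,
          PySem.List.index?_cons_of_ne _ hz]
        cases PySem.List.index? (isBalancedSums cs (l - r + -1)) 0 with
        | none => simp
        | some i => simp; ring

-- ===== VERDICT (by name: the statement is the Claim_ definition above) =====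
theorem isBalancedString_spec : Claim_equal_isBalancedString := by
  intro s _
  unfold Spec_isBalancedString isBalancedString isBalancedString_alt
  rw [isBalancedGoA_eq]
  norm_num
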